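-- pv_equiv track=rewrite | github.com/dzhang019/columbiaclusterviewer | cluster_viewer/history.py | _node_state_summary
-- ===== SOURCE A (Python) =====
-- def _node_state_summary(node_states: dict[str, int]) -> dict[str, int]:
--     summary = {"allocated": 0, "idle": 0, "down": 0, "drain": 0}
--     for state, count in node_states.items():
--         normalized = state.lower()
--         if "alloc" in normalized or "mix" in normalized:
--             summary["allocated"] += count
--         if "idle" in normalized:
--             summary["idle"] += count
--         if "down" in normalized:
--             summary["down"] += count
--         if "drain" in normalized:
--             summary["drain"] += count
--     return summary
-- ===== SOURCE B (Python) =====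
-- def _node_state_summary(node_states: dict[str, int]) -> dict[str, int]:
--     keywords = {
--         "allocated": ("alloc", "mix"),
--         "idle": ("idle",),
--         "down": ("down",),
--         "drain": ("drain",),
--     }
--     return {
--         cat: sum(count for state, count in node_states.items()
--                  if any(kw in state.lower() for kw in kws))
--         for cat, kws in keywords.items()
--     }
-- ===== Notes on version B (the rewrite author's own statement) =====
-- stated objective: alternative
-- what changed: Replaces the per-entry loop that updates four counters in a mutable dict by a per-category dict comprehension that sums the counts of matching states (outer loop over categories, inner over entries), driven by a category-to-keywords table.
import Mathlib
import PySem

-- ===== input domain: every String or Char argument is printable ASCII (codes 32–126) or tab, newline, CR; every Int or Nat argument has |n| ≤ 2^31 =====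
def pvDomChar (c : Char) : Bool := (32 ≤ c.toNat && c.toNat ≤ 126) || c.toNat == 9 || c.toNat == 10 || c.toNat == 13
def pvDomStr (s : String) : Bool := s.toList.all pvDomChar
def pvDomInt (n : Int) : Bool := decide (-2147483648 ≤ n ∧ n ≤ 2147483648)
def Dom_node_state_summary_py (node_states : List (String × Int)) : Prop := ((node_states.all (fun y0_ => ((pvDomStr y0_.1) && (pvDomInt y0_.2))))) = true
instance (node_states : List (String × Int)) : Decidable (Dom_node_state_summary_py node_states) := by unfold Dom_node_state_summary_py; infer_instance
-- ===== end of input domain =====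

-- B replaces A's per-entry loop updating four dict counters by a per-category
-- comprehension over a keyword table (alternative decomposition, same cost).

-- ===== PORT A =====
-- one iteration of A's for-loop: the four independent `if`s updating the dict
def pvStepA (d : PySem.Dict String Int) (p : String × Int) : PySem.Dict String Int :=
  let normalized := PySem.Str.lower p.1
  let d1 := if PySem.Str.isIn "alloc" normalized || PySem.Str.isIn "mix" normalized
            then d.insert "allocated" (d.getD "allocated" 0 + p.2) else d
  let d2 := if PySem.Str.isIn "idle" normalized
            then d1.insert "idle" (d1.getD "idle" 0 + p.2) else d1
  let d3 := if PySem.Str.isIn "down" normalized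
            then d2.insert "down" (d2.getD "down" 0 + p.2) else d2
  if PySem.Str.isIn "drain" normalized
  then d3.insert "drain" (d3.getD "drain" 0 + p.2) else d3

def node_state_summary_py (node_states : List (String × Int)) : List (String × Int) :=
  (node_states.foldl pvStepA
    (PySem.Dict.mk [("allocated", 0), ("idle", 0), ("down", 0), ("drain", 0)])).items

-- ===== PORT B =====
-- sum(count for state, count in node_states.items() if any(kw in state.lower() for kw in kws))
def pvCatSum (kws : List String) (ns : List (String × Int)) : Int :=
  ((ns.filter (fun p => kws.any (fun kw => PySem.Str.isIn kw (PySem.Str.lower p.1)))).map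
    (fun p => p.2)).sum

def pvKeywords : List (String × List String) :=
  [("allocated", ["alloc", "mix"]), ("idle", ["idle"]), ("down", ["down"]), ("drain", ["drain"])]

def node_state_summary_py_alt (node_states : List (String × Int)) : List (String × Int) :=
  pvKeywords.map (fun ck => (ck.1, pvCatSum ck.2 node_states))

-- ===== PRECONDITION & SPEC =====
def Spec_node_state_summary_py (node_states : List (String × Int)) (out : List (String × Int)) : Prop := out = node_state_summary_py_alt node_states
instance (node_states : List (String × Int)) (out : List (String × Int)) : Decidable (Spec_node_state_summary_py node_states out) := by unfold Spec_node_state_summary_py; infer_instance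

-- ===== CLAIM (what is proved, stated in full; the proofs are below) =====
def Claim_equal_node_state_summary_py : Prop := ∀ (node_states : List (String × Int)), Dom_node_state_summary_py node_states → Spec_node_state_summary_py node_states (node_state_summary_py node_states)

-- ===== LEMMAS AND PROOFS =====

lemma pvCatSum_cons (kws : List String) (p : String × Int) (t : List (String × Int)) :
    pvCatSum kws (p :: t) =
      (if kws.any (fun kw => PySem.Str.isIn kw (PySem.Str.lower p.1)) then p.2 else 0)
        + pvCatSum kws t := by
  simp only [pvCatSum, List.filter_cons]
  split <;> simp

lemma pv_loopA (ns : List (String × Int)) (a b c e : Int) :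
    ns.foldl pvStepA (PySem.Dict.mk [("allocated", a), ("idle", b), ("down", c), ("drain", e)]) =
      PySem.Dict.mk
        [("allocated", a + pvCatSum ["alloc", "mix"] ns),
         ("idle", b + pvCatSum ["idle"] ns),
         ("down", c + pvCatSum ["down"] ns),
         ("drain", e + pvCatSum ["drain"] ns)] := by
  induction ns generalizing a b c e with
  | nil => simp [pvCatSum]
  | cons p t ih =>
    simp only [List.foldl_cons, pvCatSum_cons, pvStepA]
    split_ifs <;>
      simp_all [PySem.Dict.insert, PySem.Dict.getD, PySem.Dict.get?, PySem.Dict.contains,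
        List.find?] <;> omega

-- ===== VERDICT (by name: the statement is the Claim_ definition above) =====
theorem node_state_summary_py_spec : Claim_equal_node_state_summary_py := by
  intro ns _
  show _ = _
  simp [node_state_summary_py, node_state_summary_py_alt, pv_loopA, pvKeywords]
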